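-- pv_equiv track=rewrite | github.com/matthieudemari/SUTD_ILP_Computing2020 | W4S2 - MT/Grades/functions/1005500/convert_hours.py | convert_hours
-- ===== SOURCE A (Python) =====
-- def convert_hours(total_hours):
--     weeks=0
--     days=0
--     hours=0
--     while True:
--         if total_hours>=168:
--             total_hours-=168
--             weeks+=1
--         elif total_hours<24:
--             total_hours-=1
--             hours+=1
--             if total_hours==0:
--                 return weeks, days, hours
--         else:
--             total_hours-=24
--             days+=1
-- ===== SOURCE B (Python) =====
-- def convert_hours(total_hours):
--     weeks, rem = divmod(total_hours, 168)
--     days, hours = divmod(rem, 24)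
--     return weeks, days, hours
-- ===== Notes on version B (the rewrite author's own statement) =====
-- stated objective: simpler
-- what changed: Replaced the one-hour/one-day/one-week subtraction loop by two divmod computations (closed form); intended as asymptotically faster (O(1) vs O(total_hours)) but a timing run could not confirm a ratio at measurable sizes.
-- outside the precondition, e.g. on convert_hours(0): A does not finish within the time limit, B returns (0, 0, 0); on convert_hours(24): A does not finish within the time limit, B returns (0, 1, 0)
import Mathlib
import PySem

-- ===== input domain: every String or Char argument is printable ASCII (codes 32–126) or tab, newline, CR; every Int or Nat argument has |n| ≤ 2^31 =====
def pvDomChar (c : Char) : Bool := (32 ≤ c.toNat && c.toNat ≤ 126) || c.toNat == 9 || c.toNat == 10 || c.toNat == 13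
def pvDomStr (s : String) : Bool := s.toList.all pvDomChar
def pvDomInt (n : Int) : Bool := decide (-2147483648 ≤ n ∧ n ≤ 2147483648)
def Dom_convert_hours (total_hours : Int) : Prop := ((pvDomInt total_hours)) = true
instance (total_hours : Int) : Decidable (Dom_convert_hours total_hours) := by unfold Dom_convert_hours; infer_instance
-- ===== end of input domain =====

-- B replaces A's repeated subtraction loop (one iteration per week/day/hour) by two
-- closed-form divmod computations (simpler; no loop).

-- ===== PORT A =====
-- A's 'while True' loop, fueled; on inputs in Pre_ each iteration strictly decreases
-- total_hours toward 0, so total_hours.toNat fuel suffices (proved below); outside Pre_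
-- the Python loop never returns.
def convertHoursLoop : Nat → Int → Int → Int → Int → List Int
  | 0, _, _, _, _ => []
  | fuel+1, t, weeks, days, hours =>
    if t ≥ 168 then
      convertHoursLoop fuel (t - 168) (weeks + 1) days hours
    else if t < 24 then
      if t - 1 = 0 then [weeks, days, hours + 1]
      else convertHoursLoop fuel (t - 1) weeks days (hours + 1)
    else
      convertHoursLoop fuel (t - 24) weeks (days + 1) hours

def convert_hours (total_hours : Int) : List Int :=
  convertHoursLoop total_hours.toNat total_hours 0 0 0

-- ===== PORT B =====
def convert_hours_alt (total_hours : Int) : List Int :=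
  let weeks := PySem.Int.floordiv total_hours 168
  let rem := PySem.Int.mod total_hours 168
  let days := PySem.Int.floordiv rem 24
  let hours := PySem.Int.mod rem 24
  [weeks, days, hours]

-- ===== PRECONDITION & SPEC =====
-- Pre_ excludes exactly the inputs on which A never returns: total_hours ≤ 0, or a
-- positive multiple of 24, where the final hour-by-hour countdown steps past 0 and
-- the Python loop diverges.
def Pre_convert_hours (total_hours : Int) : Prop :=
  0 < total_hours ∧ total_hours % 24 ≠ 0
instance (total_hours : Int) : Decidable (Pre_convert_hours total_hours) := by
  unfold Pre_convert_hours; infer_instance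

def pvWitness_convert_hours : Int := (500)

def Spec_convert_hours (total_hours : Int) (out : List Int) : Prop := out = convert_hours_alt total_hours
instance (total_hours : Int) (out : List Int) : Decidable (Spec_convert_hours total_hours out) := by unfold Spec_convert_hours; infer_instance

-- ===== CLAIM (what is proved, stated in full; the proofs are below) =====
def Claim_equal_convert_hours : Prop := ∀ (total_hours : Int), Dom_convert_hours total_hours → Pre_convert_hours total_hours → Spec_convert_hours total_hours (convert_hours total_hours)

-- ===== LEMMAS AND PROOFS =====

-- Loop invariant: with enough fuel, the loop returns the accumulators plus the
-- closed-form decomposition of the remaining t.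
theorem convertHoursLoop_eq (fuel : Nat) :
    ∀ (t weeks days hours : Int), 0 < t → t % 24 ≠ 0 → t.toNat ≤ fuel →
      convertHoursLoop fuel t weeks days hours =
        [weeks + t / 168, days + (t % 168) / 24, hours + t % 24] := by
  induction fuel with
  | zero => intro t _ _ _ ht _ hfuel; omega
  | succ n ih =>
    intro t weeks days hours ht hmod hfuel
    rw [convertHoursLoop]
    split_ifs with h168 h24 h1
    · rw [ih (t - 168) (weeks + 1) days hours (by omega) (by omega) (by omega)]
      have h1 : (t - 168) / 168 = t / 168 - 1 := by omega
      have h2 : (t - 168) % 168 = t % 168 := by omega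
      have h3 : (t - 168) % 24 = t % 24 := by omega
      rw [h1, h2, h3]; ring_nf
    · -- t = 1: returns
      have ht1 : t = 1 := by omega
      subst ht1; norm_num
    · -- 0 < t < 24, t ≠ 1 (and t % 24 ≠ 0 so t ≥ 1, here t ≥ 2)
      rw [ih (t - 1) weeks days (hours + 1) (by omega) (by omega) (by omega)]
      have hb : 2 ≤ t ∧ t < 24 := by omega
      have h1 : (t - 1) / 168 = 0 := by omega
      have h2 : t / 168 = 0 := by omega
      have h3 : (t - 1) % 168 = t - 1 := by omega
      have h4 : t % 168 = t := by omega
      have h5 : (t - 1) / 24 = 0 := by omega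
      have h6 : t / 24 = 0 := by omega
      have h7 : (t - 1) % 24 = t - 1 := by omega
      have h8 : t % 24 = t := by omega
      rw [h1, h2, h3, h4, h5, h6, h7, h8]; ring_nf
    · -- 24 ≤ t < 168
      rw [ih (t - 24) weeks (days + 1) hours (by omega) (by omega) (by omega)]
      have hb : 24 ≤ t ∧ t < 168 := ⟨by omega, by omega⟩
      have h1 : (t - 24) / 168 = 0 := by omega
      have h2 : t / 168 = 0 := by omega
      have h3 : (t - 24) % 168 = t - 24 := by omega
      have h4 : t % 168 = t := by omega
      have h5 : (t - 24) / 24 = t / 24 - 1 := by omega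
      have h6 : (t - 24) % 24 = t % 24 := by omega
      rw [h1, h2, h3, h4, h5, h6]
      ring_nf

-- ===== VERDICT (by name: the statement is the Claim_ definition above) =====
theorem convert_hours_spec : Claim_equal_convert_hours := by
  intro t _ hpre
  obtain ⟨hpos, hmod⟩ := hpre
  unfold Spec_convert_hours convert_hours convert_hours_alt
  rw [convertHoursLoop_eq t.toNat t 0 0 0 hpos hmod (by omega)]
  simp only [PySem.Int.floordiv_eq_ediv_of_pos (by norm_num : (0:Int) < 168),
      PySem.Int.mod_eq_emod_of_pos (by norm_num : (0:Int) < 168),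
      PySem.Int.floordiv_eq_ediv_of_pos (by norm_num : (0:Int) < 24),
      PySem.Int.mod_eq_emod_of_pos (by norm_num : (0:Int) < 24)]
  have h : t % 168 % 24 = t % 24 := by omega
  simp [h]
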